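-- pv_equiv track=rewrite | github.com/Lyc-heng/watermarking | robust.py | get_max_lineandcow
-- ===== SOURCE A (Python) =====
-- def get_max_lineandcow(array):
--     index = 0
--     max_value = 0
--     max_x = 0
--     max_y = 0
--     for y in range(0, len(array)):
--         for x in range(index, len(array)):
--             if (array[y][x] > max_value):
--                 max_x = x
--                 max_y = y
--                 max_value = array[y][x]
--         index += 1
--     return max_y, max_x
-- ===== SOURCE B (Python) =====
-- def get_max_lineandcow(array):
--     n = len(array)
--     rows = []
--     for y in range(n):
--         seg = [array[y][x] for x in range(y, n)]
--         if seg: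
--             m = max(seg)
--             rows.append((m, y, y + seg.index(m)))
--     best = (0, 0, 0)
--     for e in rows:
--         if e[0] > best[0]:
--             best = e
--     return best[1], best[2]
-- ===== Notes on version B (the rewrite author's own statement) =====
-- stated objective: alternative
-- what changed: Replaces the single nested running-max scan by a per-row reduction (max of each row's upper-triangle slice via max()/index()) followed by a separate combine pass that selects the first strictly-greater row maximum, seeded at 0.
import Mathlib
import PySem

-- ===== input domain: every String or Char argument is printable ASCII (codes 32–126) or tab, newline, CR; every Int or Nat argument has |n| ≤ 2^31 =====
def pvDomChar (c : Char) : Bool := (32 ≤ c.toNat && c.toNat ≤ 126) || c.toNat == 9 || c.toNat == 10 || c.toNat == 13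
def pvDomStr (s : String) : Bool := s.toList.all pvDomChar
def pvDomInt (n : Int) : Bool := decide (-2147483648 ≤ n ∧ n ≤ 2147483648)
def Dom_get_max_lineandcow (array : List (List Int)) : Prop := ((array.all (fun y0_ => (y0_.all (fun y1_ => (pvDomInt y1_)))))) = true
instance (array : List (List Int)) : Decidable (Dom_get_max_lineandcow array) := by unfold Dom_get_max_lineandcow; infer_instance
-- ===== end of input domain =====

-- B replaces A's nested running-max scan by a per-row reduction (max + first index of each
-- upper-triangle row slice) followed by a combine pass over the row table (alternative decomposition).


-- ===== PORT A =====
-- state: ((max_value, max_x, max_y), index)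
def get_max_lineandcow (array : List (List Int)) : Int × Int :=
  let n : Int := (array.length : Int)
  let r := (PySem.List.pyRange 0 n 1).foldl
    (fun st y =>
      let s := (PySem.List.pyRange st.2 n 1).foldl
        (fun s x =>
          if PySem.List.pyGetD (PySem.List.pyGetD array y []) x 0 > s.1
          then (PySem.List.pyGetD (PySem.List.pyGetD array y []) x 0, x, y)
          else s) st.1
      (s, st.2 + 1))
    (((0 : Int), (0 : Int), (0 : Int)), (0 : Int))
  ((r.1).2.2, (r.1).2.1)

-- ===== PORT B =====
-- one row of B's table: (row max over row[y:n], y, column of its first occurrence), none if the slice is empty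
def rowEntry (y : Int) (row : List Int) (n : Int) : Option (Int × Int × Int) :=
  let seg := (PySem.List.pyRange y n 1).map (fun x => PySem.List.pyGetD row x 0)
  match PySem.List.max? seg (fun v => v) with
  | none => none
  | some m =>
    match PySem.List.index? seg m with
    | none => none
    | some i => some (m, y, y + (i : Int))

def get_max_lineandcow_alt (array : List (List Int)) : Int × Int :=
  let n : Int := (array.length : Int)
  let rows := (PySem.List.pyRange 0 n 1).filterMap (fun y => rowEntry y (PySem.List.pyGetD array y []) n)
  let best := rows.foldl (fun b e => if e.1 > b.1 then e else b) ((0 : Int), (0 : Int), (0 : Int))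
  (best.2.1, best.2.2)

-- ===== PRECONDITION & SPEC =====
-- Pre_ excludes exactly the inputs where A raises IndexError: a row shorter than the number of rows.
def Pre_get_max_lineandcow (array : List (List Int)) : Prop :=
  ∀ row ∈ array, array.length ≤ row.length
instance (array : List (List Int)) : Decidable (Pre_get_max_lineandcow array) := by
  unfold Pre_get_max_lineandcow; infer_instance
def pvWitness_get_max_lineandcow : List (List Int) := [[1, 2], [3, 4]]

def Spec_get_max_lineandcow (array : List (List Int)) (out : Int × Int) : Prop := out = get_max_lineandcow_alt array
instance (array : List (List Int)) (out : Int × Int) : Decidable (Spec_get_max_lineandcow array out) := by unfold Spec_get_max_lineandcow; infer_instance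

-- ===== CLAIM (what is proved, stated in full; the proofs are below) =====
def Claim_equal_get_max_lineandcow : Prop := ∀ (array : List (List Int)), Dom_get_max_lineandcow array → Pre_get_max_lineandcow array → Spec_get_max_lineandcow array (get_max_lineandcow array)


-- ===== LEMMAS AND PROOFS =====

-- swap of the last two state components; A's state is (value, x, y), B's is (value, y, x)
def pswap (t : Int × Int × Int) : Int × Int × Int := (t.1, t.2.2, t.2.1)

-- A's `index` variable always equals the current outer y: drop it from the state
theorem a_index (array : List (List Int)) (n : Int) :
    ∀ (m : Nat) (a : Int), m = (n - a).toNat → ∀ (s : Int × Int × Int),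
    ((PySem.List.pyRange a n 1).foldl
       (fun st y =>
         ((PySem.List.pyRange st.2 n 1).foldl
            (fun s x =>
              if PySem.List.pyGetD (PySem.List.pyGetD array y []) x 0 > s.1
              then (PySem.List.pyGetD (PySem.List.pyGetD array y []) x 0, x, y)
              else s) st.1, st.2 + 1))
       (s, a)).1
    = (PySem.List.pyRange a n 1).foldl
       (fun s y =>
         (PySem.List.pyRange y n 1).foldl
            (fun s x =>
              if PySem.List.pyGetD (PySem.List.pyGetD array y []) x 0 > s.1
              then (PySem.List.pyGetD (PySem.List.pyGetD array y []) x 0, x, y)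
              else s) s) s := by
  intro m
  induction m with
  | zero =>
    intro a hm s
    rw [PySem.List.pyRange_one_eq_nil (by omega)]
    simp
  | succ m ih =>
    intro a hm s
    rw [PySem.List.pyRange_one_cons (by omega)]
    simp only [List.foldl_cons]
    exact ih (a + 1) (by omega) _

-- a fold over range indices with a[x] lookups is a fold over enumerate(a[a0:b])
theorem foldl_pyRange_enum {α β : Type} (xs : List α) (d : α) (f : β → Int → α → β) :
    ∀ (m : Nat) (a b : Int), m = (b - a).toNat → 0 ≤ a → 0 ≤ b → b ≤ (xs.length : Int) →
    ∀ (s : β),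
    (PySem.List.pyRange a b 1).foldl (fun s x => f s x (PySem.List.pyGetD xs x d)) s
    = (PySem.List.enumerate (PySem.List.slice xs (some a) (some b)) a).foldl
        (fun s p => f s p.1 p.2) s := by
  intro m
  induction m with
  | zero =>
    intro a b hm ha hb hbl s
    rw [PySem.List.pyRange_one_eq_nil (by omega), PySem.List.slice_toNat xs ha hb]
    have : b.toNat - a.toNat = 0 := by omega
    simp [this, PySem.List.enumerate_nil]
  | succ m ih =>
    intro a b hm ha hb hbl s
    have hab : a < b := by omega
    have h1 : a.toNat < xs.length := by omega
    have hseg : PySem.List.slice xs (some a) (some b)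
        = PySem.List.pyGetD xs a d :: PySem.List.slice xs (some (a + 1)) (some b) := by
      rw [PySem.List.slice_toNat xs ha hb, PySem.List.slice_toNat xs (by omega) hb]
      rw [List.drop_eq_getElem_cons h1]
      have h2 : b.toNat - a.toNat = (b.toNat - (a + 1).toNat) + 1 := by omega
      have h3 : (a + 1).toNat = a.toNat + 1 := by omega
      rw [h2, h3, List.take_succ_cons, PySem.List.pyGetD_eq_getElem xs d ha (by omega)]
    rw [PySem.List.pyRange_one_cons hab, hseg, PySem.List.enumerate_cons]
    simp only [List.foldl_cons]
    exact ih (a + 1) b (by omega) (by omega) hb hbl _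

-- A's inner loop over one row slice, as structural recursion over the slice with positions
def bestOf (y : Int) : List Int → Int → (Int × Int × Int) → (Int × Int × Int)
  | [], _, s => s
  | v :: t, a, s => bestOf y t (a + 1) (if v > s.1 then (v, a, y) else s)

theorem enum_foldl_bestOf (y : Int) :
    ∀ (seg : List Int) (a : Int) (s : Int × Int × Int),
    (PySem.List.enumerate seg a).foldl (fun s q => if q.2 > s.1 then (q.2, q.1, y) else s) s
    = bestOf y seg a s := by
  intro seg
  induction seg with
  | nil => intro a s; simp [PySem.List.enumerate_nil, bestOf]
  | cons v t ih =>
    intro a s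
    rw [PySem.List.enumerate_cons]
    simp only [List.foldl_cons, bestOf]
    exact ih (a + 1) _

theorem foldl_max_shift : ∀ (t : List Int) (v w : Int), t.foldl max (max v w) = max v (t.foldl max w) := by
  intro t
  induction t with
  | nil => intro v w; rfl
  | cons u t ih =>
    intro v w
    simp only [List.foldl_cons]
    rw [max_assoc, ih]

-- the strict-running-max loop lands on the FIRST occurrence of the slice maximum
theorem bestOf_char (y : Int) :
    ∀ (t : List Int) (v a : Int) (s : Int × Int × Int),
    bestOf y (v :: t) a s =
      if t.foldl max v > s.1
      then (t.foldl max v, a + (((PySem.List.index? (v :: t) (t.foldl max v)).getD 0 : Nat) : Int), y)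
      else s := by
  intro t
  induction t with
  | nil =>
    intro v a s
    simp [bestOf]

  | cons w t' ih =>
    intro v a s
    have hwle := (PySem.List.le_foldl_max t' w).1
    have hmem : t'.foldl max w ∈ w :: t' := by
      rcases PySem.List.foldl_max_mem t' w with h | h
      · rw [h]; exact List.mem_cons_self
      · exact List.mem_cons_of_mem _ h
    obtain ⟨k, hk⟩ : ∃ k, PySem.List.index? (w :: t') (t'.foldl max w) = some k := by
      have := (PySem.List.index?_isSome_iff (w :: t') (t'.foldl max w)).mpr hmem
      exact Option.isSome_iff_exists.mp this
    have hm : (w :: t').foldl max v = t'.foldl max (max v w) := rfl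
    have hshift : t'.foldl max (max v w) = max v (t'.foldl max w) := foldl_max_shift t' v w
    show bestOf y (w :: t') (a + 1) (if v > s.1 then (v, a, y) else s) = _
    rw [ih w (a + 1) _]
    by_cases h1 : v > s.1
    · simp only [if_pos h1]
      by_cases h2 : t'.foldl max w > v
      · have hmv : (w :: t').foldl max v = t'.foldl max w := by rw [hm, hshift]; omega
        have hne : v ≠ t'.foldl max w := by omega
        rw [hmv, PySem.List.index?_cons_of_ne _ hne, hk]
        simp only [Option.map_some, Option.getD_some]
        have : a + 1 + (k : Int) = a + ((k + 1 : Nat) : Int) := by push_cast; ring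
        rw [if_pos h2, if_pos (by omega), this]
      · have hmv : (w :: t').foldl max v = v := by rw [hm, hshift]; omega
        rw [hmv, PySem.List.index?_cons_self]
        simp only [if_neg h2, if_pos h1, Option.getD_some, Nat.cast_zero, add_zero]
    · simp only [if_neg h1]
      by_cases h2 : t'.foldl max w > s.1
      · have h3 : t'.foldl max w > v := by omega
        have hmv : (w :: t').foldl max v = t'.foldl max w := by rw [hm, hshift]; omega
        have hne : v ≠ t'.foldl max w := by omega
        rw [hmv, PySem.List.index?_cons_of_ne _ hne, hk]
        simp only [Option.map_some, Option.getD_some]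
        have : a + 1 + (k : Int) = a + ((k + 1 : Nat) : Int) := by push_cast; ring
        rw [if_pos h2, if_pos (by omega), this]
      · have hmv : (w :: t').foldl max v ≤ s.1 := by rw [hm, hshift]; omega
        rw [if_neg h2, if_neg (by omega)]

-- Source B's [row[x] for x in range(a, b)] is the slice row[a:b] when the indices are in range
theorem map_pyRange_eq_slice {α : Type} (xs : List α) (d : α) :
    ∀ (m : Nat) (a b : Int), m = (b - a).toNat → 0 ≤ a → 0 ≤ b → b ≤ (xs.length : Int) →
    (PySem.List.pyRange a b 1).map (fun x => PySem.List.pyGetD xs x d)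
      = PySem.List.slice xs (some a) (some b) := by
  intro m
  induction m with
  | zero =>
    intro a b hm ha hb hbl
    rw [PySem.List.pyRange_one_eq_nil (by omega), PySem.List.slice_toNat xs ha hb]
    have : b.toNat - a.toNat = 0 := by omega
    simp [this]
  | succ m ih =>
    intro a b hm ha hb hbl
    have h1 : a.toNat < xs.length := by omega
    have hseg : PySem.List.slice xs (some a) (some b)
        = PySem.List.pyGetD xs a d :: PySem.List.slice xs (some (a + 1)) (some b) := by
      rw [PySem.List.slice_toNat xs ha hb, PySem.List.slice_toNat xs (by omega) hb]
      rw [List.drop_eq_getElem_cons h1]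
      have h2 : b.toNat - a.toNat = (b.toNat - (a + 1).toNat) + 1 := by omega
      have h3 : (a + 1).toNat = a.toNat + 1 := by omega
      rw [h2, h3, List.take_succ_cons, PySem.List.pyGetD_eq_getElem xs d ha (by omega)]
    rw [PySem.List.pyRange_one_cons (by omega), hseg, List.map_cons]
    rw [ih (a + 1) b (by omega) (by omega) hb hbl]

-- one row: A's inner loop result, phrased through B's row entry
theorem row_step (n y : Int) (row : List Int) (hy : 0 ≤ y) (hyn : y < n) (hn : n ≤ (row.length : Int)) :
    ∃ m x, rowEntry y row n = some (m, y, x) ∧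
      ∀ (s : Int × Int × Int),
        (PySem.List.enumerate (PySem.List.slice row (some y) (some n)) y).foldl
          (fun s q => if q.2 > s.1 then (q.2, q.1, y) else s) s
        = if m > s.1 then (m, x, y) else s := by
  have hseg : PySem.List.slice row (some y) (some n)
      = (row.drop y.toNat).take (n.toNat - y.toNat) := PySem.List.slice_toNat row hy (by omega)
  have hlen : (PySem.List.slice row (some y) (some n)).length ≠ 0 := by
    rw [hseg]
    simp only [List.length_take, List.length_drop]
    omega
  rcases hcs : PySem.List.slice row (some y) (some n) with _ | ⟨v, t⟩
  · rw [hcs] at hlen; simp at hlen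
  · have hmem : List.foldl max v t ∈ v :: t := by
      rcases PySem.List.foldl_max_mem t v with h | h
      · rw [h]; exact List.mem_cons_self
      · exact List.mem_cons_of_mem _ h
    obtain ⟨k, hk⟩ : ∃ k, PySem.List.index? (v :: t) (List.foldl max v t) = some k := by
      have := (PySem.List.index?_isSome_iff (v :: t) (List.foldl max v t)).mpr hmem
      exact Option.isSome_iff_exists.mp this
    refine ⟨List.foldl max v t, y + (k : Int), ?_, ?_⟩
    · unfold rowEntry
      rw [map_pyRange_eq_slice row 0 (n - y).toNat y n rfl hy (by omega) hn, hcs]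
      simp only [PySem.List.max?_id_cons, hk]
    · intro s
      rw [enum_foldl_bestOf, bestOf_char, hk]
      rfl

-- the whole nested loop equals B's table-combine, with the last two state components swapped
theorem outer (n : Int) :
    ∀ (l : List (List Int)) (k : Int), 0 ≤ k → k + (l.length : Int) ≤ n →
    (∀ row ∈ l, n ≤ (row.length : Int)) → ∀ (s : Int × Int × Int),
    (PySem.List.enumerate l k).foldl
      (fun s p =>
        (PySem.List.enumerate (PySem.List.slice p.2 (some p.1) (some n)) p.1).foldl
          (fun s q => if q.2 > s.1 then (q.2, q.1, p.1) else s) s) s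
    = pswap (((PySem.List.enumerate l k).filterMap (fun p => rowEntry p.1 p.2 n)).foldl
        (fun b e => if e.1 > b.1 then e else b) (pswap s)) := by
  intro l
  induction l with
  | nil =>
    intro k hk hkn hrows s
    simp [PySem.List.enumerate_nil, pswap]
  | cons row l' ih =>
    intro k hk hkn hrows s
    obtain ⟨m, x, he, hf⟩ := row_step n k row hk (by simp at hkn ⊢; omega)
      (hrows row List.mem_cons_self)
    rw [PySem.List.enumerate_cons]
    simp only [List.foldl_cons, List.filterMap_cons, he]
    rw [hf s]
    have hstep : pswap (if m > s.1 then (m, x, k) else s)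
        = if m > (pswap s).1 then (m, k, x) else pswap s := by
      by_cases h : m > s.1 <;> simp [pswap, h]
    rw [ih (k + 1) (by omega) (by simp at hkn ⊢; omega)
      (fun r hr => hrows r (List.mem_cons_of_mem _ hr)) (if m > s.1 then (m, x, k) else s), hstep]


-- ===== VERDICT (by name: the statement is the Claim_ definition above) =====
theorem get_max_lineandcow_spec : Claim_equal_get_max_lineandcow := by
  intro array _ hpre
  have hn0 : (0 : Int) ≤ (array.length : Int) := by omega
  have hrows : ∀ row ∈ array, (array.length : Int) ≤ (row.length : Int) := by
    intro r hr; exact_mod_cast hpre r hr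
  have hsl : PySem.List.slice array (some 0) (some (array.length : Int)) = array := by
    rw [PySem.List.slice_toNat array le_rfl hn0]
    simp
  have hcong : ∀ (acc : Int × Int × Int) (p : Int × List Int), p ∈ PySem.List.enumerate array 0 →
      (PySem.List.pyRange p.1 (array.length : Int) 1).foldl
        (fun s x => if PySem.List.pyGetD p.2 x 0 > s.1
          then (PySem.List.pyGetD p.2 x 0, x, p.1) else s) acc
      = (PySem.List.enumerate (PySem.List.slice p.2 (some p.1) (some (array.length : Int))) p.1).foldl
          (fun s q => if q.2 > s.1 then (q.2, q.1, p.1) else s) acc := by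
    intro acc p hp
    obtain ⟨k, hk, hpe⟩ := (PySem.List.mem_enumerate_iff array 0 p).mp hp
    have hmem : p.2 ∈ array := by rw [hpe]; exact List.getElem_mem hk
    have hp1 : (0 : Int) ≤ p.1 := by rw [hpe]; simp
    exact foldl_pyRange_enum p.2 0 (fun s x v => if v > s.1 then (v, x, p.1) else s)
      (((array.length : Int) - p.1)).toNat p.1 (array.length : Int) rfl hp1 hn0
      (hrows p.2 hmem) acc
  have e1 := a_index array (array.length : Int) ((array.length : Int) - 0).toNat 0 rfl
    ((0 : Int), (0 : Int), (0 : Int))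
  have e2 := foldl_pyRange_enum array []
    (fun s y row => (PySem.List.pyRange y (array.length : Int) 1).foldl
      (fun s x => if PySem.List.pyGetD row x 0 > s.1
        then (PySem.List.pyGetD row x 0, x, y) else s) s)
    ((array.length : Int) - 0).toNat 0 (array.length : Int) rfl le_rfl hn0 le_rfl
    ((0 : Int), (0 : Int), (0 : Int))
  rw [hsl] at e2
  have e3 := PySem.List.foldl_congr_mem (PySem.List.enumerate array 0) _ _ ((0 : Int), (0 : Int), (0 : Int)) hcong
  have e4 := outer (array.length : Int) array 0 le_rfl (by omega) hrows
    ((0 : Int), (0 : Int), (0 : Int))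
  have key := e1.trans (e2.trans (e3.trans e4))
  have hfm : (PySem.List.pyRange 0 (array.length : Int) 1).filterMap
        (fun y => rowEntry y (PySem.List.pyGetD array y []) (array.length : Int))
      = (PySem.List.enumerate array 0).filterMap
          (fun p => rowEntry p.1 p.2 (array.length : Int)) := by
    rw [PySem.List.enumerate_eq_map_pyRange array ([] : List Int), List.filterMap_map]
    rfl
  show (_, _) = (_, _)
  rw [hfm, key]
  rfl
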